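-- pv_equiv track=rewrite | github.com/robotdognz/OxfordPropaedia | pipeline/10_export_json.py | _build_structure
-- ===== SOURCE A (Python) =====
-- def parse_section_code(code: str) -> tuple[int, int, int] | None:
--     """Parse a section code into (part_number, division_number, section_number).
--
--     Returns None for invalid/anomalous codes.
--     """
--     # Part 10: 10/XY where X=div, Y=sec
--     if code.startswith("10/"):
--         rest = code[3:]
--         if len(rest) == 2 and rest.isdigit():
--             return (10, int(rest[0]), int(rest[1]))
--         return None
--
--     # Parts 1-9 with slash: XY/Z where X=part, Y=div, Z=sec (sec > 9)
--     if "/" in code: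
--         parts = code.split("/")
--         if len(parts) == 2 and len(parts[0]) == 2 and parts[0].isdigit() and parts[1].isdigit():
--             return (int(parts[0][0]), int(parts[0][1]), int(parts[1]))
--         return None
--
--     # Parts 1-9 standard: XYZ where X=part, Y=div, Z=sec
--     if len(code) == 3 and code.isdigit():
--         return (int(code[0]), int(code[1]), int(code[2]))
--
--     return None
--
-- def _build_structure(sections: dict[str, dict]) -> dict:
--     """Build the full Part → Division → Section hierarchy from section codes."""
--     # Collect all (part, div, sec) tuples
--     hierarchy: dict[int, dict[int, list[str]]] = {}
--     for code in sections:
--         parsed = parse_section_code(code)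
--         if parsed is None:
--             continue
--         part_num, div_num, sec_num = parsed
--         if part_num not in hierarchy:
--             hierarchy[part_num] = {}
--         if div_num not in hierarchy[part_num]:
--             hierarchy[part_num][div_num] = []
--         hierarchy[part_num][div_num].append(code)
--
--     # Sort sections within each division
--     for part_num in hierarchy:
--         for div_num in hierarchy[part_num]:
--             hierarchy[part_num][div_num].sort(
--                 key=lambda c: parse_section_code(c)[2] if parse_section_code(c) else 0
--             )
--
--     return hierarchy
-- ===== SOURCE B (Python) =====
-- def parse_section_code(code: str) -> tuple[int, int, int] | None:
--     """Parse a section code into (part_number, division_number, section_number).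
--
--     Returns None for invalid/anomalous codes.
--     """
--     if code.startswith("10/"):
--         rest = code[3:]
--         if len(rest) == 2 and rest.isdigit():
--             return (10, int(rest[0]), int(rest[1]))
--         return None
--     if "/" in code:
--         parts = code.split("/")
--         if len(parts) == 2 and len(parts[0]) == 2 and parts[0].isdigit() and parts[1].isdigit():
--             return (int(parts[0][0]), int(parts[0][1]), int(parts[1]))
--         return None
--     if len(code) == 3 and code.isdigit():
--         return (int(code[0]), int(code[1]), int(code[2]))
--     return None
--
--
-- def _build_structure(sections: dict[str, dict]) -> dict:
--     """Build the Part → Division → Section hierarchy in ONE pass: each code is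
--     inserted at its sorted position in its division (online stable insertion),
--     so no per-division sort pass is needed afterwards."""
--     hierarchy: dict[int, dict[int, list[str]]] = {}
--     for code in sections:
--         parsed = parse_section_code(code)
--         if parsed is None:
--             continue
--         part_num, div_num, sec_num = parsed
--         divisions = hierarchy.setdefault(part_num, {})
--         lst = divisions.setdefault(div_num, [])
--         # insert after every code already placed with section number <= sec_num
--         i = 0
--         while i < len(lst) and parse_section_code(lst[i])[2] <= sec_num:
--             i += 1
--         lst.insert(i, code)
--     return hierarchy
-- ===== Notes on version B (the rewrite author's own statement) =====
-- stated objective: alternative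
-- what changed: B builds each division's code list by inserting every code at its sorted position during the single collection pass (online stable insertion), replacing A's two-phase append-everything-then-sort-each-division-with-a-key-lambda.
import Mathlib
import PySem

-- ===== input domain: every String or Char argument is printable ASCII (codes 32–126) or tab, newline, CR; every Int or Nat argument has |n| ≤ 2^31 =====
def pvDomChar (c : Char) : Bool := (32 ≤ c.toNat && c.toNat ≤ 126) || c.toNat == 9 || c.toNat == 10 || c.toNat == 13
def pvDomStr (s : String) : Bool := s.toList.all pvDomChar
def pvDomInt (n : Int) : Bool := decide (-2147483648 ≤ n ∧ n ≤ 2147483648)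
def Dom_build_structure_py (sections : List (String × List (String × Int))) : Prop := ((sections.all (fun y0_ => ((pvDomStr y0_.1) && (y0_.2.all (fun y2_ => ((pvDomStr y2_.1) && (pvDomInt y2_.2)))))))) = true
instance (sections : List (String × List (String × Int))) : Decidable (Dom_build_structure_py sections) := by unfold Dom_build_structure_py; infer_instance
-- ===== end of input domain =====

-- B replaces A's two-phase "append every code, then sort each division list with a key lambda"
-- by a single pass that inserts each code directly at its sorted position in its division
-- (online stable insertion); same return value, no speed claim ("alternative").
-- The Python dicts are mutated only locally inside A/B; the proved equivalence is about the return value.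

-- ===== PORT A =====
-- shared module helper parse_section_code (identical source in Source A and Source B)
-- int(<single digit char>): guarded by isdigit/length checks, so `.getD 0` is unreachable
def digitInt (oc : Option Char) : Int :=
  match oc with
  | some c => (PySem.Int.ofChars? [c]).getD 0
  | none => 0

-- int(<digit string>): guarded by isdigit, so `.getD 0` is unreachable
def strInt (s : String) : Int := (PySem.Int.ofStr? s).getD 0

def parseSectionCode (code : String) : Option (Int × Int × Int) :=
  -- Part 10: 10/XY
  if PySem.Str.startswith code "10/" then
    let rest := PySem.Str.slice code (some 3) none
    if PySem.Str.len rest == 2 && PySem.Str.strIsdigit rest then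
      some (10, digitInt (PySem.Str.pyGet? rest 0), digitInt (PySem.Str.pyGet? rest 1))
    else none
  -- Parts 1-9 with slash: XY/Z
  else if PySem.Str.isIn "/" code then
    let parts := (PySem.Str.split? code "/").getD []   -- sep "/" ≠ "": split? is always `some`
    if parts.length == 2 && PySem.Str.len ((PySem.List.pyGet? parts 0).getD "") == 2
        && PySem.Str.strIsdigit ((PySem.List.pyGet? parts 0).getD "")
        && PySem.Str.strIsdigit ((PySem.List.pyGet? parts 1).getD "") then
      some (digitInt (PySem.Str.pyGet? ((PySem.List.pyGet? parts 0).getD "") 0),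
            digitInt (PySem.Str.pyGet? ((PySem.List.pyGet? parts 0).getD "") 1),
            strInt ((PySem.List.pyGet? parts 1).getD ""))
    else none
  -- Parts 1-9 standard: XYZ
  else if PySem.Str.len code == 3 && PySem.Str.strIsdigit code then
    some (digitInt (PySem.Str.pyGet? code 0), digitInt (PySem.Str.pyGet? code 1),
          digitInt (PySem.Str.pyGet? code 2))
  else none

-- A's sort key lambda: `parse_section_code(c)[2] if parse_section_code(c) else 0`
-- (a 3-tuple is always truthy, so the `else 0` branch fires exactly on None)
def secKey (c : String) : Int :=
  match parseSectionCode c with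
  | some t => t.2.2
  | none => 0

def build_structure_py (sections : List (String × List (String × Int))) : List (Int × List (Int × List String)) :=
  -- `for code in sections` iterates the dict's keys: distinct, in first-occurrence order
  let hierarchy : PySem.Dict Int (PySem.Dict Int (List String)) :=
    (PySem.List.dedup (sections.map Prod.fst)).foldl (fun h code =>
      match parseSectionCode code with
      | none => h                              -- continue
      | some (part_num, div_num, _sec_num) =>
        let h1 := if h.contains part_num then h else h.insert part_num PySem.Dict.empty
        let h2 := if (h1.getD part_num PySem.Dict.empty).contains div_num then h1
                  else h1.modify part_num PySem.Dict.empty (fun divs => divs.insert div_num [])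
        h2.modify part_num PySem.Dict.empty (fun divs => divs.modify div_num [] (fun lst => lst ++ [code]))
      ) PySem.Dict.empty
  -- second loop: sort each division's list in place by section number
  let sortedH : PySem.Dict Int (PySem.Dict Int (List String)) :=
    PySem.Dict.mk (hierarchy.items.map (fun pd =>
      (pd.1, PySem.Dict.mk (pd.2.items.map (fun dl => (dl.1, PySem.List.sorted dl.2 secKey false))))))
  sortedH.items.map (fun pd => (pd.1, pd.2.items))

-- ===== PORT B =====
-- port of Source B's `i = 0; while i < len(lst) and parse_section_code(lst[i])[2] <= sec_num: i += 1; lst.insert(i, code)`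
-- (every code already in lst parses to a valid triple, so `[2]` is secKey)
def insertBySec (sec_num : Int) (code : String) : List String → List String
  | [] => [code]
  | c :: rest => if secKey c ≤ sec_num then c :: insertBySec sec_num code rest
                 else code :: c :: rest

def build_structure_py_alt (sections : List (String × List (String × Int))) : List (Int × List (Int × List String)) :=
  let hierarchy : PySem.Dict Int (PySem.Dict Int (List String)) :=
    (PySem.List.dedup (sections.map Prod.fst)).foldl (fun h code =>
      match parseSectionCode code with
      | none => h                              -- continue
      | some (part_num, div_num, sec_num) =>
        let divisions := h.getD part_num PySem.Dict.empty   -- hierarchy.setdefault(part_num, {})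
        let lst := divisions.getD div_num []                -- divisions.setdefault(div_num, [])
        -- lst.insert(i, code) mutates the shared list: written back via insert (same position)
        h.insert part_num (divisions.insert div_num (insertBySec sec_num code lst))
      ) PySem.Dict.empty
  hierarchy.items.map (fun pd => (pd.1, pd.2.items))

-- ===== PRECONDITION & SPEC =====
def Spec_build_structure_py (sections : List (String × List (String × Int))) (out : List (Int × List (Int × List String))) : Prop := out = build_structure_py_alt sections
instance (sections : List (String × List (String × Int))) (out : List (Int × List (Int × List String))) : Decidable (Spec_build_structure_py sections out) := by unfold Spec_build_structure_py; infer_instance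

-- ===== CLAIM (what is proved, stated in full; the proofs are below) =====
def Claim_equal_build_structure_py : Prop := ∀ (sections : List (String × List (String × Int))), Dom_build_structure_py sections → Spec_build_structure_py sections (build_structure_py sections)

-- ===== LEMMAS AND PROOFS =====
-- helper abbreviations for the proofs
def sortInner (divs : PySem.Dict Int (List String)) : PySem.Dict Int (List String) :=
  PySem.Dict.mk (divs.items.map (fun dl => (dl.1, PySem.List.sorted dl.2 secKey false)))

def sortH (h : PySem.Dict Int (PySem.Dict Int (List String))) : PySem.Dict Int (PySem.Dict Int (List String)) :=
  PySem.Dict.mk (h.items.map (fun pd => (pd.1, sortInner pd.2)))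

theorem contains_mapval {ν ν' : Type} (g : ν → ν') (l : List (Int × ν)) (k : Int) :
    (PySem.Dict.mk (l.map (fun pd => (pd.1, g pd.2)))).contains k = (PySem.Dict.mk l).contains k := by
  simp only [PySem.Dict.contains, PySem.Dict.items, List.any_map]
  congr 1

theorem getD_mapval {ν ν' : Type} (g : ν → ν') (l : List (Int × ν)) (k : Int) (d0 : ν) :
    (PySem.Dict.mk (l.map (fun pd => (pd.1, g pd.2)))).getD k (g d0) = g ((PySem.Dict.mk l).getD k d0) := by
  induction l with
  | nil => simp [PySem.Dict.getD, PySem.Dict.get?, PySem.Dict.items]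
  | cons q t ih =>
    by_cases hq : (q.1 == k) = true
    · simp [PySem.Dict.getD, PySem.Dict.get?, PySem.Dict.items, List.find?, hq]
    · simpa [PySem.Dict.getD, PySem.Dict.get?, PySem.Dict.items, List.find?, hq] using ih

theorem insert_mapval {ν ν' : Type} (g : ν → ν') (l : List (Int × ν)) (k : Int) (v : ν) :
    (PySem.Dict.mk (l.map (fun pd => (pd.1, g pd.2)))).insert k (g v)
      = PySem.Dict.mk (((PySem.Dict.mk l).insert k v).items.map (fun pd => (pd.1, g pd.2))) := by
  by_cases hc : (PySem.Dict.mk l).contains k = true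
  · simp only [PySem.Dict.insert, contains_mapval, hc, if_pos, PySem.Dict.items, List.map_map]
    congr 1
    apply List.map_congr_left
    intro p _
    by_cases hp : (p.1 == k) = true <;> simp [Function.comp, hp]
  · simp only [PySem.Dict.insert, contains_mapval]
    rw [if_neg hc, if_neg hc]
    simp

theorem sortH_getD (h : PySem.Dict Int (PySem.Dict Int (List String))) (p : Int) :
    (sortH h).getD p PySem.Dict.empty = sortInner (h.getD p PySem.Dict.empty) :=
  getD_mapval sortInner h.items p PySem.Dict.empty

theorem sortInner_getD (divs : PySem.Dict Int (List String)) (d : Int) :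
    (sortInner divs).getD d [] = PySem.List.sorted (divs.getD d []) secKey false :=
  getD_mapval (fun l => PySem.List.sorted l secKey false) divs.items d []

theorem sortH_insert (h : PySem.Dict Int (PySem.Dict Int (List String))) (p : Int)
    (v : PySem.Dict Int (List String)) :
    (sortH h).insert p (sortInner v) = sortH (h.insert p v) :=
  insert_mapval sortInner h.items p v

theorem sortInner_insert (divs : PySem.Dict Int (List String)) (d : Int) (L : List String) :
    (sortInner divs).insert d (PySem.List.sorted L secKey false) = sortInner (divs.insert d L) :=
  insert_mapval (fun l => PySem.List.sorted l secKey false) divs.items d L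

theorem insertBySec_eq_insertBy (code : String) (M : List String) :
    insertBySec (secKey code) code M
      = PySem.List.insertBy (fun a b => decide (secKey a < secKey b)) code M := by
  induction M with
  | nil => simp [insertBySec, PySem.List.insertBy]
  | cons c t ih =>
    by_cases hle : secKey c ≤ secKey code
    · simp [insertBySec, PySem.List.insertBy, hle, not_lt.mpr hle, ih]
    · simp [insertBySec, PySem.List.insertBy, hle, lt_of_not_ge hle]

theorem insertBySec_sorted (code : String) (L : List String) :
    insertBySec (secKey code) code (PySem.List.sorted L secKey false)
      = PySem.List.sorted (L ++ [code]) secKey false := by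
  rw [insertBySec_eq_insertBy, PySem.List.sorted_eq_foldl_insertBy, PySem.List.sorted_eq_foldl_insertBy,
    List.foldl_append]
  rfl


-- A's three-step mutation (ensure part, ensure division, append) as one canonical insert
theorem stepA_eq (h : PySem.Dict Int (PySem.Dict Int (List String))) (p d : Int) (code : String) :
    (if ((if h.contains p then h else h.insert p PySem.Dict.empty).getD p PySem.Dict.empty).contains d
       then (if h.contains p then h else h.insert p PySem.Dict.empty)
       else (if h.contains p then h else h.insert p PySem.Dict.empty).modify p PySem.Dict.empty
              (fun divs => divs.insert d [])).modify p PySem.Dict.empty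
      (fun divs => divs.modify d [] (fun lst => lst ++ [code]))
    = h.insert p ((h.getD p PySem.Dict.empty).insert d
        ((h.getD p PySem.Dict.empty).getD d [] ++ [code])) := by
  by_cases hc : h.contains p = true
  · by_cases hd : (h.getD p PySem.Dict.empty).contains d = true
    · simp [PySem.Dict.modify, hc, hd]
    · simp [PySem.Dict.modify, hc, hd, PySem.Dict.getD_insert_self, PySem.Dict.insert_insert_self]
      rw [PySem.Dict.getD_of_not_contains (h.getD p PySem.Dict.empty) ([] : List String) (by simpa using hd)]
      simp
  · simp [PySem.Dict.modify, hc, PySem.Dict.getD_insert_self, PySem.Dict.insert_insert_self,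
      PySem.Dict.contains_empty, PySem.Dict.getD_empty]
    rw [PySem.Dict.getD_of_not_contains _ _ (by simpa using hc)]
    simp [PySem.Dict.getD_empty]

theorem step_commute (h : PySem.Dict Int (PySem.Dict Int (List String))) (p d : Int)
    (code : String) (s : Int) (hk : secKey code = s) :
    (sortH h).insert p (((sortH h).getD p PySem.Dict.empty).insert d
        (insertBySec s code (((sortH h).getD p PySem.Dict.empty).getD d [])))
      = sortH (h.insert p ((h.getD p PySem.Dict.empty).insert d
          ((h.getD p PySem.Dict.empty).getD d [] ++ [code]))) := by
  subst hk
  rw [sortH_getD, sortInner_getD, insertBySec_sorted, sortInner_insert, sortH_insert]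

theorem fold_inv (ks : List String) (h : PySem.Dict Int (PySem.Dict Int (List String))) :
    ks.foldl (fun h code =>
      match parseSectionCode code with
      | none => h
      | some (part_num, div_num, sec_num) =>
        let divisions := h.getD part_num PySem.Dict.empty
        let lst := divisions.getD div_num []
        h.insert part_num (divisions.insert div_num (insertBySec sec_num code lst))) (sortH h)
    = sortH (ks.foldl (fun h code =>
      match parseSectionCode code with
      | none => h
      | some (part_num, div_num, _sec_num) =>
        let h1 := if h.contains part_num then h else h.insert part_num PySem.Dict.empty
        let h2 := if (h1.getD part_num PySem.Dict.empty).contains div_num then h1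
                  else h1.modify part_num PySem.Dict.empty (fun divs => divs.insert div_num [])
        h2.modify part_num PySem.Dict.empty
          (fun divs => divs.modify div_num [] (fun lst => lst ++ [code]))) h) := by
  induction ks generalizing h with
  | nil => rfl
  | cons code t ih =>
    simp only [List.foldl_cons]
    cases hp : parseSectionCode code with
    | none => simp only [hp]; exact ih h
    | some triple =>
      obtain ⟨p, d, s⟩ := triple
      simp only [hp]
      rw [step_commute h p d code s (by simp [secKey, hp]), stepA_eq]
      exact ih _

-- ===== VERDICT (by name: the statement is the Claim_ definition above) =====
theorem build_structure_py_spec : Claim_equal_build_structure_py := by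
  intro sections _
  unfold Spec_build_structure_py
  exact congrArg (fun dd => dd.items.map (fun pd => (pd.1, pd.2.items)))
    (fold_inv (PySem.List.dedup (sections.map Prod.fst)) PySem.Dict.empty).symm
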